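-- pv_equiv track=rewrite | github.com/tousifhabib/Money-Forward-Tracks-Test | Question4/Solution.py | add_candidate
-- ===== SOURCE A (Python) =====
-- def add_candidate(candidates, a, b):
--     # add the candidate to the list
--     candidates.append((a, b))
--
--     # sort the list by interview score in decreasing order, then by paper test score in decreasing order
--     candidates.sort(key=lambda c: (-c[1], -c[0]))
--
--     # iterate over the list to eliminate any candidates that are inferior to a previous candidate in the list
--     i = 0
--     while i < len(candidates) - 1:
--         # check if the paper test score and interview score of the candidate at index i+1 are both lower than or equal to those of the candidate at index i
--         if candidates[i][0] >= candidates[i + 1][0] and candidates[i][1] >= candidates[i + 1][1]: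
--             # delete the candidate at index i+1, since it is inferior to the one at index i
--             del candidates[i + 1]
--         else:
--             # move on to the next candidate
--             i += 1
--
--     # return the updated candidate list
--     return candidates
-- ===== SOURCE B (Python) =====
-- def add_candidate(candidates, a, b):
--     # add the candidate, sort as A does (decreasing interview score, then decreasing paper score)
--     candidates.append((a, b))
--     candidates.sort(key=lambda c: (-c[1], -c[0]))
--     # single forward pass: keep a candidate only if it beats the last kept one in some score
--     res = []
--     prev = None
--     for c in candidates:
--         if prev is None or c[0] > prev[0] or c[1] > prev[1]:
--             res.append(c)
--             prev = c
--     candidates[:] = res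
--     return candidates
-- ===== Notes on version B (the rewrite author's own statement) =====
-- stated objective: alternative
-- what changed: replaces A's while-loop with repeated in-place deletions by a single forward pass over the sorted list that keeps a reference to the last retained candidate
import Mathlib
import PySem

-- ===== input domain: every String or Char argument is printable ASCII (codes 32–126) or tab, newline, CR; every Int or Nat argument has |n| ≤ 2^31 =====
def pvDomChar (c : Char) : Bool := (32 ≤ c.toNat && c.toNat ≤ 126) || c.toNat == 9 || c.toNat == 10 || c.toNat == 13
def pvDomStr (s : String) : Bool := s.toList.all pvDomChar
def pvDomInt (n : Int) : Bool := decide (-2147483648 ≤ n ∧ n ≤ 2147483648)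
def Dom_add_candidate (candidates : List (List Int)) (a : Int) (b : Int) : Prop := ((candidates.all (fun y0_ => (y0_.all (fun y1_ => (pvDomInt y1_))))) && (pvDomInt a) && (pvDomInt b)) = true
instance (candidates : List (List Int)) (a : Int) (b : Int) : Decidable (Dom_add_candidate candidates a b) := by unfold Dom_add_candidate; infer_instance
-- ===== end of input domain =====

-- B replaces A's deletion loop by one forward pass keeping the last retained candidate.
-- Both Pythons mutate `candidates` the same way (append, in-place sort, removal of the
-- dominated entries); the theorem is about the returned value.

-- ===== PORT A =====
-- c[k] for the inner 2-element lists; in range on every input Pre_ admits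
def pvG (c : List Int) (k : Int) : Int := (PySem.List.pyGet? c k).getD 0

-- while i < len(candidates) - 1: if dominated then del candidates[i+1] else i += 1
-- (fuel is only a totality guard: `lst.length - i` drops by 1 each iteration, so
-- fuel = initial length always suffices; with fuel 0 the loop state is returned as is)
def pvLoopA (fuel : Nat) (lst : List (List Int)) (i : Nat) : List (List Int) :=
  match fuel with
  | 0 => lst
  | fuel + 1 =>
    if i < lst.length - 1 then
      let ci := lst[i]?.getD []
      let cj := lst[i+1]?.getD []
      if pvG ci 0 ≥ pvG cj 0 ∧ pvG ci 1 ≥ pvG cj 1 then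
        pvLoopA fuel (lst.eraseIdx (i+1)) i
      else
        pvLoopA fuel lst (i+1)
    else lst

def add_candidate (candidates : List (List Int)) (a : Int) (b : Int) : List (List Int) :=
  let s := PySem.List.sorted2 (candidates ++ [[a, b]]) (fun c => -(pvG c 1)) (fun c => -(pvG c 0)) false
  pvLoopA s.length s 0

-- ===== PORT B =====
-- for c in candidates: keep c iff prev is None or c beats prev in some score
def pvScanB (prev : Option (List Int)) (xs : List (List Int)) : List (List Int) :=
  match xs with
  | [] => []
  | c :: rest =>
    match prev with
    | none => c :: pvScanB (some c) rest
    | some p =>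
      if pvG c 0 > pvG p 0 ∨ pvG c 1 > pvG p 1 then c :: pvScanB (some c) rest
      else pvScanB (some p) rest

def add_candidate_alt (candidates : List (List Int)) (a : Int) (b : Int) : List (List Int) :=
  pvScanB none (PySem.List.sorted2 (candidates ++ [[a, b]]) (fun c => -(pvG c 1)) (fun c => -(pvG c 0)) false)

-- ===== PRECONDITION & SPEC =====
-- Pre_ excludes exactly the inputs where Python A raises IndexError: an existing
-- candidate with fewer than two scores (the sort key reads c[1]). B raises there too.
def Pre_add_candidate (candidates : List (List Int)) (a : Int) (b : Int) : Prop :=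
  ∀ c ∈ candidates, 2 ≤ c.length
instance (candidates : List (List Int)) (a : Int) (b : Int) : Decidable (Pre_add_candidate candidates a b) := by unfold Pre_add_candidate; infer_instance
def pvWitness_add_candidate : List (List Int) × Int × Int := ([[1, 2], [3, 1]], 2, 3)

def Spec_add_candidate (candidates : List (List Int)) (a : Int) (b : Int) (out : List (List Int)) : Prop := out = add_candidate_alt candidates a b
instance (candidates : List (List Int)) (a : Int) (b : Int) (out : List (List Int)) : Decidable (Spec_add_candidate candidates a b out) := by unfold Spec_add_candidate; infer_instance

-- ===== CLAIM (what is proved, stated in full; the proofs are below) =====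
def Claim_equal_add_candidate : Prop := ∀ (candidates : List (List Int)) (a : Int) (b : Int), Dom_add_candidate candidates a b → Pre_add_candidate candidates a b → Spec_add_candidate candidates a b (add_candidate candidates a b)

-- ===== LEMMAS AND PROOFS =====

-- A's loop, sitting at index |done| (the last retained element p), behaves like B's scan
-- of the remaining suffix with p as the reference; holds for any list, sorted or not.
theorem pvLoopA_eq_scan (rest : List (List Int)) :
    ∀ (fuel : Nat) (done : List (List Int)) (p : List Int), rest.length ≤ fuel →
      pvLoopA fuel (done ++ p :: rest) done.length = done ++ p :: pvScanB (some p) rest := by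
  induction rest with
  | nil =>
    intro fuel done p _
    match fuel with
    | 0 => simp [pvLoopA, pvScanB]
    | fuel + 1 =>
      rw [pvLoopA]
      simp [pvScanB]
  | cons c rest ih =>
    intro fuel done p hf
    match fuel with
    | 0 => simp at hf
    | fuel + 1 =>
    have hf' : rest.length ≤ fuel := by simpa using hf
    rw [pvLoopA]
    have hlen : done.length < (done ++ p :: c :: rest).length - 1 := by
      simp
    rw [if_pos hlen]
    have hget1 : (done ++ p :: c :: rest)[done.length]?.getD [] = p := by
      simp
    have hget2 : (done ++ p :: c :: rest)[done.length + 1]?.getD [] = c := by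
      have : done ++ p :: c :: rest = (done ++ [p]) ++ c :: rest := by simp
      rw [this]
      have hl : (done ++ [p]).length = done.length + 1 := by simp
      rw [← hl, List.getElem?_append_right (by omega)]
      simp
    rw [hget1, hget2]
    by_cases hc : pvG p 0 ≥ pvG c 0 ∧ pvG p 1 ≥ pvG c 1
    · rw [if_pos hc]
      have herase : (done ++ p :: c :: rest).eraseIdx (done.length + 1)
          = done ++ p :: rest := by
        have : done ++ p :: c :: rest = (done ++ [p]) ++ c :: rest := by simp
        rw [this]
        have hl : (done ++ [p]).length = done.length + 1 := by simp
        rw [← hl, List.eraseIdx_append_of_length_le (by omega)]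
        simp
      rw [herase, ih fuel done p hf']
      have : ¬ (pvG c 0 > pvG p 0 ∨ pvG c 1 > pvG p 1) := by omega
      simp [pvScanB, this]
    · rw [if_neg hc]
      have h2 : done ++ p :: c :: rest = (done ++ [p]) ++ c :: rest := by simp
      have hl : done.length + 1 = (done ++ [p]).length := by simp
      rw [h2, hl, ih fuel (done ++ [p]) c hf']
      have : pvG c 0 > pvG p 0 ∨ pvG c 1 > pvG p 1 := by omega
      simp [pvScanB, this]

-- ===== VERDICT (by name: the statement is the Claim_ definition above) =====
theorem add_candidate_spec : Claim_equal_add_candidate := by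
  intro candidates a b _ _
  unfold Spec_add_candidate add_candidate add_candidate_alt
  have hne : PySem.List.sorted2 (candidates ++ [[a, b]]) (fun c => -(pvG c 1)) (fun c => -(pvG c 0)) false ≠ [] := by
    intro h
    have hperm := PySem.List.sorted2_perm (candidates ++ [[a, b]]) (fun c => -(pvG c 1)) (fun c => -(pvG c 0)) false
    rw [h] at hperm
    have := hperm.length_eq
    simp at this
  obtain ⟨q, t, hqt⟩ := List.exists_cons_of_ne_nil hne
  rw [hqt]
  have := pvLoopA_eq_scan t (q :: t).length [] q (by simp)
  simpa [pvScanB] using this
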